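-- pv_equiv track=rewrite | github.com/sidneycadot/project_euler | p_000026/solution.py | decimal_expansion_repeat_length
-- ===== SOURCE A (Python) =====
-- def decimal_expansion_repeat_length(d: int):
--     """Return the repeat length of the decimal expansion of 1/d."""
--
--     remainder = 1
--     prev = {}
--
--     while True:
--         remainder = (remainder * 10) % d
--         if remainder in prev:
--             break
--         prev[remainder] = len(prev)
--
--     return len(prev) - prev[remainder]
-- ===== SOURCE B (Python) =====
-- def decimal_expansion_repeat_length(d: int):
--     """Return the repeat length of the decimal expansion of 1/d."""
--
--     # strip the factors 2 and 5 (they only create a non-repeating prefix)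
--     n = abs(d)
--     while n and n % 2 == 0:
--         n //= 2
--     while n and n % 5 == 0:
--         n //= 5
--
--     # the repeat length is the least k >= 1 with 10**k == 1 (mod n)
--     x = 10 % n
--     k = 1
--     while x != 1 % n:
--         x = x * 10 % n
--         k += 1
--     return k
-- ===== Notes on version B (the rewrite author's own statement) =====
-- stated objective: alternative
-- what changed: Instead of simulating long division while recording every remainder in a dict until the first repeat, B strips the factors 2 and 5 from |d| (they only produce the non-repeating prefix) and then counts the multiplicative order of 10 modulo the stripped modulus with a plain counter, so the dict and the pre-periodic tail simulation disappear.
import Mathlib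
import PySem

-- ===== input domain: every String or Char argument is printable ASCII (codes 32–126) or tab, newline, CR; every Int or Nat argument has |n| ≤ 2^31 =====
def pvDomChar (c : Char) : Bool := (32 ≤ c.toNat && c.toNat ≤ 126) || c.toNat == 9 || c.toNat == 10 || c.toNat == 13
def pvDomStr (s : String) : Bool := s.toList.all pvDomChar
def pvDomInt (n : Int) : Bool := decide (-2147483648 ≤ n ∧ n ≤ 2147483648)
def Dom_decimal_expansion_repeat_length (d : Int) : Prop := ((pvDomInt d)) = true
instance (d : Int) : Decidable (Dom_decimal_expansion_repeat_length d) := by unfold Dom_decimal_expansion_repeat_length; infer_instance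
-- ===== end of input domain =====

-- B strips the factors 2 and 5 from |d| and counts the multiplicative order of 10 modulo the
-- stripped modulus with a bare counter, replacing A's dict-recording long-division simulation
-- (no dict and no pre-periodic tail; equivalence proved for all d ≠ 0).

-- ===== PORT A =====
-- the 'while True' loop; the fuel argument is a termination guard only: with the initial
-- fuel |d| + 1 the break is always reached first (proved below), so the 0-branch is dead.
def pvALoop (d : Int) (remainder : Int) (prev : PySem.Dict Int Int) : Nat → Int
  | 0 => 0
  | fuel+1 =>
    let r := PySem.Int.mod (remainder * 10) d
    match prev.get? r with
    | some v => ((PySem.Dict.size prev : Int)) - v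
    | none => pvALoop d r (prev.insert r ((PySem.Dict.size prev : Int))) fuel

def decimal_expansion_repeat_length (d : Int) : Int :=
  pvALoop d 1 PySem.Dict.empty (d.natAbs + 1)

-- ===== PORT B =====
-- 'while n and n % p == 0: n //= p'  (p = 2 and 5 at the call sites; the '2 ≤ p' conjunct is a
-- termination guard only and is true at every call site)
def pvStrip (p n : Nat) : Nat :=
  if h : 2 ≤ p ∧ n ≠ 0 ∧ n % p = 0 then pvStrip p (n / p) else n
decreasing_by exact Nat.div_lt_self (Nat.pos_of_ne_zero h.2.1) h.1

-- 'x = 10 % n; k = 1; while x != 1 % n: x = x * 10 % n; k += 1; return k'; fuel guard only: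
-- with initial fuel n the loop always stops at the order first (proved below)
def pvOrderLoop (n : Nat) : Nat → Nat → Nat → Nat
  | _, k, 0 => k
  | x, k, fuel+1 => if x = 1 % n then k else pvOrderLoop n (x * 10 % n) (k + 1) fuel

def decimal_expansion_repeat_length_alt (d : Int) : Int :=
  let n := pvStrip 5 (pvStrip 2 d.natAbs)
  ((pvOrderLoop n (10 % n) 1 n : Nat) : Int)

-- ===== PRECONDITION & SPEC =====
-- Pre_ excludes exactly d = 0, on which A raises ZeroDivisionError (and B does too).
def Pre_decimal_expansion_repeat_length (d : Int) : Prop := d ≠ 0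
instance (d : Int) : Decidable (Pre_decimal_expansion_repeat_length d) := by
  unfold Pre_decimal_expansion_repeat_length; infer_instance
def pvWitness_decimal_expansion_repeat_length : Int := 7

def Spec_decimal_expansion_repeat_length (d : Int) (out : Int) : Prop := out = decimal_expansion_repeat_length_alt d
instance (d : Int) (out : Int) : Decidable (Spec_decimal_expansion_repeat_length d out) := by unfold Spec_decimal_expansion_repeat_length; infer_instance

-- ===== CLAIM (what is proved, stated in full; the proofs are below) =====
def Claim_equal_decimal_expansion_repeat_length : Prop := ∀ (d : Int), Dom_decimal_expansion_repeat_length d → Pre_decimal_expansion_repeat_length d → Spec_decimal_expansion_repeat_length d (decimal_expansion_repeat_length d)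

-- ===== LEMMAS AND PROOFS =====

-- Python '%' congruence toolkit
theorem pvMod_sub_dvd (a b : Int) : b ∣ (a - PySem.Int.mod a b) := by
  have h := PySem.Int.floordiv_mul_add_mod a b
  exact ⟨PySem.Int.floordiv a b, by linarith⟩

theorem pvMod_eq_iff {b : Int} (hb : b ≠ 0) (x y : Int) :
    PySem.Int.mod x b = PySem.Int.mod y b ↔ b ∣ (x - y) := by
  have h1 := pvMod_sub_dvd x b
  have h2 := pvMod_sub_dvd y b
  constructor
  · intro h
    have h3 : b ∣ (x - PySem.Int.mod x b) - (y - PySem.Int.mod y b) := dvd_sub h1 h2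
    have h4 : (x - PySem.Int.mod x b) - (y - PySem.Int.mod y b) = x - y := by rw [h]; ring
    rwa [h4] at h3
  · intro h
    have hdvd : b ∣ (PySem.Int.mod x b - PySem.Int.mod y b) := by
      have h5 : PySem.Int.mod x b - PySem.Int.mod y b
          = (y - PySem.Int.mod y b) - (x - PySem.Int.mod x b) + (x - y) := by ring
      rw [h5]; exact dvd_add (dvd_sub h2 h1) h
    have habs : |PySem.Int.mod x b - PySem.Int.mod y b| < |b| := by
      rcases lt_or_gt_of_ne hb with hneg | hpos
      · have bx := PySem.Int.mod_neg_bounds x hneg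
        have by' := PySem.Int.mod_neg_bounds y hneg
        rw [abs_of_nonpos (le_of_lt hneg)]
        rw [abs_lt]; omega
      · have bx1 := PySem.Int.mod_nonneg x hpos
        have bx2 := PySem.Int.mod_lt x hpos
        have by1 := PySem.Int.mod_nonneg y hpos
        have by2 := PySem.Int.mod_lt y hpos
        rw [abs_of_pos hpos, abs_lt]; omega
    have := Int.eq_zero_of_abs_lt_dvd ((abs_dvd _ _).2 hdvd) habs
    linarith

theorem pvMod_step {d : Int} (hd : d ≠ 0) (x : Int) (i : Nat)
    (h : x = PySem.Int.mod ((10:Int)^i) d) :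
    PySem.Int.mod (x * 10) d = PySem.Int.mod ((10:Int)^(i+1)) d := by
  subst h
  rw [pvMod_eq_iff hd]
  have h1 : d ∣ ((10:Int)^i - PySem.Int.mod ((10:Int)^i) d) * 10 :=
    (pvMod_sub_dvd ((10:Int)^i) d).mul_right 10
  have h2 : PySem.Int.mod ((10:Int)^i) d * 10 - (10:Int)^(i+1)
      = -(((10:Int)^i - PySem.Int.mod ((10:Int)^i) d) * 10) := by ring
  rw [h2]; exact dvd_neg.2 h1

-- multiplicative order: existence and divisibility characterisation
theorem pvOrderEx (n' : Nat) (hn : n' ≠ 0) (hc : Nat.Coprime 10 n') :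
    ∃ k, 0 < k ∧ (10:Nat)^k ≡ 1 [MOD n'] :=
  ⟨n'.totient, Nat.totient_pos.2 (Nat.pos_of_ne_zero hn), Nat.ModEq.pow_totient hc⟩

theorem pvOrder_dvd (n' t : Nat) (htm : (10:Nat)^t ≡ 1 [MOD n'])
    (hmin : ∀ j, 0 < j → j < t → ¬ ((10:Nat)^j ≡ 1 [MOD n'])) (ht : 0 < t) (g : Nat) :
    ((10:Nat)^g ≡ 1 [MOD n']) ↔ t ∣ g := by
  constructor
  · intro hg
    have hr : g % t < t := Nat.mod_lt _ ht
    have h10q : (10:Nat)^(t*(g/t)) ≡ 1 [MOD n'] := by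
      have := htm.pow (g/t)
      simpa [← pow_mul, one_pow] using this
    have hsplit : (10:Nat)^(t*(g/t)) * 10^(g % t) = 10^g := by
      rw [← pow_add, Nat.div_add_mod]
    have hmodr : (10:Nat)^(g % t) ≡ 1 [MOD n'] := by
      have hmul : (10:Nat)^(t*(g/t)) * 10^(g % t) ≡ 1 * 10^(g % t) [MOD n'] :=
        h10q.mul_right _
      rw [hsplit, one_mul] at hmul
      exact (hmul.symm.trans hg)
    rcases Nat.eq_zero_or_pos (g % t) with h0 | hpos
    · exact Nat.dvd_of_mod_eq_zero h0
    · exact absurd hmodr (hmin _ hpos hr)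
  · rintro ⟨m, rfl⟩
    have := htm.pow m
    simpa [← pow_mul, one_pow] using this

-- the first-repeat characterisation of the remainder sequence
theorem pvRepeat_iff {d : Int} (hd : d ≠ 0) (a b n' : Nat)
    (hN : d.natAbs = 2^a * 5^b * n')
    (h2 : ¬ 2 ∣ n') (h5 : ¬ 5 ∣ n') (t : Nat)
    (ho : ∀ g, ((10:Nat)^g ≡ 1 [MOD n']) ↔ t ∣ g)
    (i k : Nat) (_hi1 : 1 ≤ i) (hik : i < k) :
    PySem.Int.mod ((10:Int)^i) d = PySem.Int.mod ((10:Int)^k) d ↔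
      (a ≤ i ∧ b ≤ i ∧ t ∣ (k - i)) := by
  have hN0 : d.natAbs ≠ 0 := Int.natAbs_ne_zero.mpr hd
  set g := k - i with hgdef
  have hg1 : 1 ≤ g := by omega
  have hki : k = i + g := by omega
  have hle : (10:Nat)^i ≤ 10^k := Nat.pow_le_pow_right (by norm_num) (by omega)
  have hcast : ((10:Int)^k - (10:Int)^i) = (((10^i * (10^g - 1) : Nat)) : Int) := by
    have hnat : (10:Nat)^i * (10^g - 1) = 10^k - 10^i := by
      rw [Nat.mul_sub, Nat.mul_one, ← pow_add, ← hki]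
    rw [hnat, Nat.cast_sub hle]
    push_cast
    ring
  have step1 : (PySem.Int.mod ((10:Int)^i) d = PySem.Int.mod ((10:Int)^k) d)
      ↔ d.natAbs ∣ 10^i * (10^g - 1) := by
    rw [pvMod_eq_iff hd, dvd_sub_comm, hcast, ← Int.natAbs_dvd, Int.natCast_dvd_natCast]
  rw [step1, hN]
  have hw1 : 1 ≤ (10:Nat)^g := Nat.one_le_pow _ _ (by norm_num)
  have hwodd : ¬ 2 ∣ (10^g - 1 : Nat) := by
    intro h2w
    have h2g : (2:Nat) ∣ 10^g := dvd_pow (by norm_num) (by omega)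
    omega
  have hw5 : ¬ 5 ∣ (10^g - 1 : Nat) := by
    intro h5w
    have h5g : (5:Nat) ∣ 10^g := dvd_pow (by norm_num) (by omega)
    omega
  have h2n'1 : Nat.Coprime 2 n' := (Nat.Prime.coprime_iff_not_dvd Nat.prime_two).2 h2
  have h5n'1 : Nat.Coprime 5 n' := (Nat.Prime.coprime_iff_not_dvd Nat.prime_five).2 h5
  have c2w : Nat.Coprime (2^a) (10^g - 1) :=
    Nat.Coprime.pow_left a ((Nat.Prime.coprime_iff_not_dvd Nat.prime_two).2 hwodd)
  have c5w : Nat.Coprime (5^b) (10^g - 1) :=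
    Nat.Coprime.pow_left b ((Nat.Prime.coprime_iff_not_dvd Nat.prime_five).2 hw5)
  have c2n' : Nat.Coprime (2^a) n' := Nat.Coprime.pow_left a h2n'1
  have c5n' : Nat.Coprime (5^b) n' := Nat.Coprime.pow_left b h5n'1
  have c25 : Nat.Coprime 2 5 := by norm_num
  have c255 : Nat.Coprime (2^a) (5^b) := c25.pow a b
  have c10n' : Nat.Coprime 10 n' := by
    have h : ((2*5 : Nat)).Coprime n' := Nat.coprime_mul_iff_left.2 ⟨h2n'1, h5n'1⟩
    simpa using h
  have cn10i : Nat.Coprime n' ((10:Nat)^i) := Nat.Coprime.pow_right i c10n'.symm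
  have h10split : (10:Nat)^i = 2^i * 5^i := by
    rw [show (10:Nat) = 2*5 by norm_num, mul_pow]
  constructor
  · intro hdvd
    have h2X : 2^a ∣ 10^i * (10^g - 1) := dvd_trans ⟨5^b * n', by ring⟩ hdvd
    have h5X : 5^b ∣ 10^i * (10^g - 1) := dvd_trans ⟨2^a * n', by ring⟩ hdvd
    have hn'X : n' ∣ 10^i * (10^g - 1) := dvd_trans ⟨2^a * 5^b, by ring⟩ hdvd
    have h2i : 2^a ∣ 10^i := c2w.dvd_of_dvd_mul_right h2X
    have h5i : 5^b ∣ 10^i := c5w.dvd_of_dvd_mul_right h5X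
    have hn'w : n' ∣ 10^g - 1 := cn10i.dvd_of_dvd_mul_left hn'X
    have hai : a ≤ i := by
      rw [h10split] at h2i
      have h2i' : 2^a ∣ 2^i := (c25.pow a i).dvd_of_dvd_mul_right h2i
      exact (Nat.pow_dvd_pow_iff_le_right (by norm_num)).1 h2i'
    have hbi : b ≤ i := by
      rw [h10split] at h5i
      have h5i' : 5^b ∣ 5^i := (c25.symm.pow b i).dvd_of_dvd_mul_left h5i
      exact (Nat.pow_dvd_pow_iff_le_right (by norm_num)).1 h5i'
    have htg : t ∣ g := (ho g).1 ((Nat.modEq_iff_dvd' hw1).2 hn'w).symm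
    exact ⟨hai, hbi, htg⟩
  · rintro ⟨hai, hbi, htg⟩
    have hn'w : n' ∣ 10^g - 1 := (Nat.modEq_iff_dvd' hw1).1 ((ho g).2 htg).symm
    have h2i : 2^a ∣ 10^i := by
      rw [h10split]; exact dvd_mul_of_dvd_left (pow_dvd_pow 2 hai) _
    have h5i : 5^b ∣ 10^i := by
      rw [h10split]; exact dvd_mul_of_dvd_right (pow_dvd_pow 5 hbi) _
    have h25 : 2^a * 5^b ∣ 10^i := Nat.Coprime.mul_dvd_of_dvd_of_dvd c255 h2i h5i
    exact Nat.Coprime.mul_dvd_of_dvd_of_dvd (Nat.coprime_mul_iff_left.2 ⟨c2n', c5n'⟩)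
      (dvd_mul_of_dvd_left h25 _) (dvd_mul_of_dvd_right hn'w _)

-- pvStrip decomposition
theorem pvStrip_spec (p : Nat) (hp : 2 ≤ p) :
    ∀ n, n ≠ 0 → ∃ e, n = p^e * pvStrip p n ∧ ¬ p ∣ pvStrip p n ∧ pvStrip p n ≠ 0 := by
  intro n
  induction n using Nat.strong_induction_on with
  | _ n ih =>
    intro hn
    rw [pvStrip]
    by_cases hdvd : n % p = 0
    · rw [dif_pos ⟨hp, hn, hdvd⟩]
      have hplt : 0 < p := by omega
      have hlt : n / p < n := Nat.div_lt_self (Nat.pos_of_ne_zero hn) hp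
      have hne : n / p ≠ 0 := by
        obtain ⟨c, rfl⟩ := Nat.dvd_of_mod_eq_zero hdvd
        rw [Nat.mul_div_cancel_left _ hplt]
        intro hc; exact hn (by rw [hc, Nat.mul_zero])
      obtain ⟨e, he, hnd, hne'⟩ := ih (n / p) hlt hne
      refine ⟨e + 1, ?_, hnd, hne'⟩
      have hmul : p * (n / p) = n := Nat.mul_div_cancel' (Nat.dvd_of_mod_eq_zero hdvd)
      calc n = p * (n / p) := hmul.symm
        _ = p * (p ^ e * pvStrip p (n / p)) := by rw [← he]
        _ = p ^ (e + 1) * pvStrip p (n / p) := by ring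
    · rw [dif_neg (by tauto)]
      exact ⟨0, by simp, fun hdv => hdvd (Nat.dvd_iff_mod_eq_zero.1 hdv), hn⟩

-- lookup in the dict built from an explicit key/value list
theorem pvGet?_mk_map (key val : Nat → Int) (l : List Nat) (x : Int) :
    (PySem.Dict.mk (l.map (fun j => (key j, val j)))).get? x
      = (l.find? (fun j => key j == x)).map val := by
  induction l with
  | nil => rfl
  | cons j rest ih =>
      simp only [List.map_cons, PySem.Dict.get?_mk_cons, List.find?_cons]
      by_cases h : key j == x
      · simp [h]
      · simp only [h, Bool.false_eq_true, if_false, ih]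

theorem pvFind?_range_unique (m j0 : Nat) (p : Nat → Bool) (hj : j0 < m)
    (hp : ∀ j, j < m → (p j = true ↔ j = j0)) : (List.range m).find? p = some j0 := by
  induction m with
  | zero => omega
  | succ m ih =>
    rw [List.range_succ, List.find?_append]
    rcases Nat.lt_or_ge j0 m with h | h
    · rw [ih h (fun j hj => hp j (by omega))]; rfl
    · have hj0 : j0 = m := by omega
      have hnone : (List.range m).find? p = none := List.find?_eq_none.2 (fun x hx hpx => by
        have hxm : x < m := List.mem_range.mp hx
        have := (hp x (by omega)).1 hpx
        omega)
      rw [hnone]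
      have hpm : p m = true := (hp m (by omega)).2 hj0.symm
      simp [List.find?, hpm, hj0]

-- A's loop returns t
theorem pvALoop_spec {d : Int} (hd : d ≠ 0) (J t : Nat) (hJ : 1 ≤ J) (ht : 1 ≤ t)
    (hdist : ∀ i k, 1 ≤ i → i < k → k < J + t →
        PySem.Int.mod ((10:Int)^i) d ≠ PySem.Int.mod ((10:Int)^k) d)
    (hback : ∀ i, 1 ≤ i → i < J + t →
        (PySem.Int.mod ((10:Int)^i) d = PySem.Int.mod ((10:Int)^(J+t)) d ↔ i = J)) :
    ∀ fuel i r, i + 1 ≤ J + t → J + t ≤ i + fuel →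
      PySem.Int.mod (r * 10) d = PySem.Int.mod ((10:Int)^(i+1)) d →
      pvALoop d r (PySem.Dict.mk ((List.range i).map
          (fun (j : Nat) => (PySem.Int.mod ((10:Int)^(j+1)) d, (j : Int))))) fuel = (t : Int) := by
  intro fuel
  induction fuel with
  | zero =>
    intro i r h1 h2 h3
    omega
  | succ fuel ih =>
    intro i r hi1 hi2 hr
    rw [pvALoop]
    simp only [hr]
    have hget := pvGet?_mk_map (fun j => PySem.Int.mod ((10:Int)^(j+1)) d)
      (fun j => (j : Int)) (List.range i) (PySem.Int.mod ((10:Int)^(i+1)) d)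
    by_cases hend : i + 1 = J + t
    · have hfind : (List.range i).find?
          (fun j => PySem.Int.mod ((10:Int)^(j+1)) d == PySem.Int.mod ((10:Int)^(i+1)) d)
          = some (J - 1) := by
        apply pvFind?_range_unique
        · omega
        · intro j hj
          rw [beq_iff_eq]
          rw [show i + 1 = J + t from hend]
          rw [hback (j+1) (by omega) (by omega)]
          omega
      rw [hget, hfind]
      simp only [Option.map_some]
      show ((PySem.Dict.mk _).size : Int) - ((J - 1 : Nat) : Int) = (t : Int)
      have hsz : (PySem.Dict.mk ((List.range i).map
          (fun (j : Nat) => (PySem.Int.mod ((10:Int)^(j+1)) d, (j : Int))))).size = i := by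
        simp [PySem.Dict.size]
      rw [hsz]
      omega
    · have hfind : (List.range i).find?
          (fun j => PySem.Int.mod ((10:Int)^(j+1)) d == PySem.Int.mod ((10:Int)^(i+1)) d)
          = none := by
        apply List.find?_eq_none.2
        intro j hjmem
        have hj : j < i := List.mem_range.mp hjmem
        simp only [beq_iff_eq]
        exact hdist (j+1) (i+1) (by omega) (by omega) (by omega)
      rw [hget, hfind]
      simp only [Option.map_none]
      have hcont : (PySem.Dict.mk ((List.range i).map
          (fun (j : Nat) => (PySem.Int.mod ((10:Int)^(j+1)) d, (j : Int))))).contains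
            (PySem.Int.mod ((10:Int)^(i+1)) d) = false := by
        rw [PySem.Dict.contains_eq_isSome_get?, hget, hfind]
        rfl
      have hins : (PySem.Dict.mk ((List.range i).map
            (fun (j : Nat) => (PySem.Int.mod ((10:Int)^(j+1)) d, (j : Int))))).insert
              (PySem.Int.mod ((10:Int)^(i+1)) d)
              (((PySem.Dict.mk ((List.range i).map
                (fun (j : Nat) => (PySem.Int.mod ((10:Int)^(j+1)) d, (j : Int))))).size : Int))
          = PySem.Dict.mk ((List.range (i+1)).map
            (fun (j : Nat) => (PySem.Int.mod ((10:Int)^(j+1)) d, (j : Int)))) := by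
        apply PySem.Dict.ext
        rw [PySem.Dict.items_insert_of_not_contains _ _ hcont]
        simp [List.range_succ, PySem.Dict.size]
      rw [hins]
      exact ih (i+1) _ (by omega) (by omega)
        (pvMod_step hd (PySem.Int.mod ((10:Int)^(i+1)) d) (i+1) rfl)

-- B's loop returns t
theorem pvOrderLoop_spec (n' t : Nat) (htm : (10:Nat)^t % n' = 1 % n')
    (hmin : ∀ j, 0 < j → j < t → ¬ ((10:Nat)^j % n' = 1 % n')) :
    ∀ fuel k, 1 ≤ k → k ≤ t → t ≤ k + fuel →
      pvOrderLoop n' ((10:Nat)^k % n') k fuel = t := by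
  intro fuel
  induction fuel with
  | zero =>
    intro k h1 h2 h3
    have hk : k = t := by omega
    subst hk
    rfl
  | succ fuel ih =>
    intro k h1 h2 h3
    rw [pvOrderLoop]
    by_cases hk : k = t
    · subst hk; rw [if_pos htm]
    · rw [if_neg (hmin k (by omega) (by omega))]
      have hx : (10:Nat)^k % n' * 10 % n' = 10^(k+1) % n' := by
        rw [Nat.mod_mul_mod, ← pow_succ]
      rw [hx]
      exact ih (k+1) (by omega) (by omega) (by omega)

-- ===== VERDICT (by name: the statement is the Claim_ definition above) =====
theorem decimal_expansion_repeat_length_spec : Claim_equal_decimal_expansion_repeat_length := by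
  intro d _hdom hpre
  unfold Spec_decimal_expansion_repeat_length
  have hd : d ≠ 0 := hpre
  have hN0 : d.natAbs ≠ 0 := Int.natAbs_ne_zero.mpr hd
  obtain ⟨a, ha, h2n1, hn10⟩ := pvStrip_spec 2 (by norm_num) d.natAbs hN0
  obtain ⟨b, hb, h5n', hn'0⟩ := pvStrip_spec 5 (by norm_num) (pvStrip 2 d.natAbs) hn10
  set n1 := pvStrip 2 d.natAbs with hn1def
  set n' := pvStrip 5 n1 with hn'def
  have hN : d.natAbs = 2^a * 5^b * n' := by rw [ha, hb]; ring
  have h2n' : ¬ 2 ∣ n' := fun h => h2n1 (hb ▸ Dvd.dvd.mul_left h (5^b))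
  have hc : Nat.Coprime 10 n' := by
    have h2c : Nat.Coprime 2 n' := (Nat.Prime.coprime_iff_not_dvd Nat.prime_two).2 h2n'
    have h5c : Nat.Coprime 5 n' := (Nat.Prime.coprime_iff_not_dvd Nat.prime_five).2 h5n'
    have h := Nat.coprime_mul_iff_left.2 ⟨h2c, h5c⟩
    simpa using h
  have hex := pvOrderEx n' hn'0 hc
  set t := Nat.find hex with htdef
  obtain ⟨ht0, htm⟩ := Nat.find_spec hex
  have hmin : ∀ j, 0 < j → j < t → ¬((10:Nat)^j ≡ 1 [MOD n']) := fun j hj hjt hmod =>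
    Nat.find_min hex hjt ⟨hj, hmod⟩
  have ho := pvOrder_dvd n' t htm hmin ht0
  set J := max (max a b) 1 with hJdef
  have hJ1 : 1 ≤ J := le_max_right _ _
  have htn' : t ≤ n' :=
    le_trans (Nat.find_min' hex ⟨Nat.totient_pos.2 (Nat.pos_of_ne_zero hn'0),
      Nat.ModEq.pow_totient hc⟩) (Nat.totient_le n')
  have hfuel : J + t ≤ d.natAbs + 1 := by
    rw [hN]
    have ha2 : a < 2^a := Nat.lt_two_pow_self
    have hb5 : b < 5^b := Nat.lt_pow_self (by norm_num)
    have hn'1 : 1 ≤ n' := Nat.pos_of_ne_zero hn'0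
    have h2ab : 2^a ≤ 2^a * 5^b := Nat.le_mul_of_pos_right _ (pow_pos (by norm_num) b)
    have h5ab : 5^b ≤ 2^a * 5^b := Nat.le_mul_of_pos_left _ (pow_pos (by norm_num) a)
    rcases Nat.eq_zero_or_pos (max a b) with h0 | hpos
    · have ha0 : a = 0 := by omega
      have hb0 : b = 0 := by omega
      subst ha0; subst hb0
      simp only [pow_zero, one_mul]
      omega
    · have hM2 : 2 ≤ 2^a * 5^b := by omega
      rcases Nat.lt_or_ge n' 2 with hn2 | hn2
      · have hn'eq : n' = 1 := by omega
        rw [hn'eq, Nat.mul_one]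
        omega
      · have := Nat.add_le_mul hM2 hn2
        omega
  have hdist : ∀ i k, 1 ≤ i → i < k → k < J + t →
      PySem.Int.mod ((10:Int)^i) d ≠ PySem.Int.mod ((10:Int)^k) d := by
    intro i k h1 h2 h3 heq
    obtain ⟨hai, hbi, htik⟩ := (pvRepeat_iff hd a b n' hN h2n' h5n' t ho i k h1 h2).1 heq
    have hiJ : J ≤ i := by omega
    have h4 : t ≤ k - i := Nat.le_of_dvd (by omega) htik
    omega
  have hback : ∀ i, 1 ≤ i → i < J + t →
      (PySem.Int.mod ((10:Int)^i) d = PySem.Int.mod ((10:Int)^(J+t)) d ↔ i = J) := by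
    intro i h1 h2
    constructor
    · intro heq
      obtain ⟨hai, hbi, htik⟩ :=
        (pvRepeat_iff hd a b n' hN h2n' h5n' t ho i (J+t) h1 (by omega)).1 heq
      have hiJ : J ≤ i := by omega
      have h4 : t ≤ J + t - i := Nat.le_of_dvd (by omega) htik
      omega
    · intro hiJ
      apply (pvRepeat_iff hd a b n' hN h2n' h5n' t ho i (J+t) h1 (by omega)).2
      refine ⟨by omega, by omega, ?_⟩
      rw [hiJ]
      simp
  have hA : decimal_expansion_repeat_length d = (t : Int) := by
    unfold decimal_expansion_repeat_length
    have h0 : (PySem.Dict.empty : PySem.Dict Int Int) = PySem.Dict.mk ((List.range 0).map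
        (fun (j : Nat) => (PySem.Int.mod ((10:Int)^(j+1)) d, (j : Int)))) := rfl
    rw [h0]
    apply pvALoop_spec hd J t hJ1 ht0 hdist hback (d.natAbs + 1) 0 1 (by omega) (by omega)
    norm_num
  have hB : decimal_expansion_repeat_length_alt d = (t : Int) := by
    show ((pvOrderLoop n' (10 % n') 1 n' : Nat) : Int) = (t : Int)
    have h10 : (10:Nat) % n' = 10^1 % n' := by rw [pow_one]
    rw [h10, pvOrderLoop_spec n' t htm hmin n' 1 (le_refl 1) ht0 (by omega)]
  rw [hA, hB]
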